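-- pv_equiv track=rewrite | github.com/Celyagd/hackinscience | exercises/107/solution.py | select_student
-- ===== SOURCE A (Python) =====
-- from operator import itemgetter
--
-- def select_student(my_class, mark_ok):
--     accepted = []
--     refused = []
--     my_class_sort = sorted(my_class, key=itemgetter(1))
--     for i in my_class_sort:
--         if i[1] >= mark_ok:
--             accepted.append(i)
--         else:
--             refused.append(i)
--     return {'Accepted': accepted[::-1], 'Refused': refused}
-- ===== SOURCE B (Python) =====
-- def select_student(my_class, mark_ok):
--     accepted = []  # kept sorted by mark descending; later students first among equal marks
--     refused = []   # kept sorted by mark ascending; earlier students first among equal marks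
--     for student in my_class:
--         if student[1] >= mark_ok:
--             i = 0
--             while i < len(accepted) and accepted[i][1] > student[1]:
--                 i += 1
--             accepted.insert(i, student)
--         else:
--             i = 0
--             while i < len(refused) and refused[i][1] <= student[1]:
--                 i += 1
--             refused.insert(i, student)
--     return {'Accepted': accepted, 'Refused': refused}
-- ===== Notes on version B (the rewrite author's own statement) =====
-- stated objective: alternative
-- what changed: B is a single-pass online insertion sort: each student is inserted directly into its final position of an accepted list kept descending (later students first among equal marks) or a refused list kept ascending, with no sorted() call, no separate partition pass and no reversal.
import Mathlib
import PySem

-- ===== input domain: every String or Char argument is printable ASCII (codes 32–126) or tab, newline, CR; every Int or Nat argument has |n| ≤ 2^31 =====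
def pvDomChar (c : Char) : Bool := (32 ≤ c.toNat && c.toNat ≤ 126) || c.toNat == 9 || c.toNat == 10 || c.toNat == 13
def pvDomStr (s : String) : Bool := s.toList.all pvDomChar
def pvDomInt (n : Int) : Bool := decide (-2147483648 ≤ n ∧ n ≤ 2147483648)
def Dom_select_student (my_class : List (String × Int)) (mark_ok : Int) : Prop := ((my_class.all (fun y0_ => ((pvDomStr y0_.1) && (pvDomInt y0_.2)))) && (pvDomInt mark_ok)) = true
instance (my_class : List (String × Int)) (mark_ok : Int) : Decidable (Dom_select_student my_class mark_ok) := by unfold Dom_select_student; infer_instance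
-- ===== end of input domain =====

-- B replaces A's sort-whole-list-then-partition by a single-pass online insertion sort
-- (each student inserted at its final place in a descending accepted / ascending refused
-- list); same values, different algorithm ("alternative", not faster).

-- ===== PORT A =====
-- sorted(my_class, key=itemgetter(1)); then one loop appending to accepted/refused; accepted[::-1]
def select_student (my_class : List (String × Int)) (mark_ok : Int) : List (String × List (String × Int)) :=
  let my_class_sort := PySem.List.sorted my_class (fun i => i.2) false
  let ar := my_class_sort.foldl
    (fun (ar : List (String × Int) × List (String × Int)) i =>
      if mark_ok ≤ i.2 then (ar.1 ++ [i], ar.2) else (ar.1, ar.2 ++ [i]))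
    ([], [])
  [("Accepted", (PySem.List.slice? ar.1 none none (-1)).getD []), ("Refused", ar.2)]

-- ===== PORT B =====
-- the forward scan `while i < len(accepted) and accepted[i][1] > student[1]` + list.insert(i, student)
-- is ported as structural insertion before the first element whose mark is ≤ student's (exact)
def pvInsDesc (x : String × Int) : List (String × Int) → List (String × Int)
  | [] => [x]
  | y :: ys => if x.2 < y.2 then y :: pvInsDesc x ys else x :: y :: ys

-- the scan `while i < len(refused) and refused[i][1] <= student[1]` + insert, ported the same way (exact)
def pvInsAsc (x : String × Int) : List (String × Int) → List (String × Int)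
  | [] => [x]
  | y :: ys => if y.2 ≤ x.2 then y :: pvInsAsc x ys else x :: y :: ys

def select_student_alt (my_class : List (String × Int)) (mark_ok : Int) : List (String × List (String × Int)) :=
  let ar := my_class.foldl
    (fun (ar : List (String × Int) × List (String × Int)) s =>
      if mark_ok ≤ s.2 then (pvInsDesc s ar.1, ar.2) else (ar.1, pvInsAsc s ar.2))
    ([], [])
  [("Accepted", ar.1), ("Refused", ar.2)]

-- ===== PRECONDITION & SPEC =====
def Spec_select_student (my_class : List (String × Int)) (mark_ok : Int) (out : List (String × List (String × Int))) : Prop := out = select_student_alt my_class mark_ok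
instance (my_class : List (String × Int)) (mark_ok : Int) (out : List (String × List (String × Int))) : Decidable (Spec_select_student my_class mark_ok out) := by unfold Spec_select_student; infer_instance

-- ===== CLAIM =====
def Claim_equal_select_student : Prop := ∀ (my_class : List (String × Int)) (mark_ok : Int), Dom_select_student my_class mark_ok → Spec_select_student my_class mark_ok (select_student my_class mark_ok)

-- ===== LEMMAS AND PROOFS =====

-- insertBy into a key-sorted list keeps it key-sorted
theorem pv_pairwise_insertBy {α κ : Type} [LinearOrder κ] (key : α → κ) (x : α) (ys : List α)
    (h : ys.Pairwise (fun a c => key a ≤ key c)) :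
    (PySem.List.insertBy (fun a b => decide (key a < key b)) x ys).Pairwise
      (fun a c => key a ≤ key c) := by
  induction ys with
  | nil => simp [PySem.List.insertBy]
  | cons y ys ih =>
    rcases List.pairwise_cons.mp h with ⟨hy, hys⟩
    by_cases hb : key x < key y
    · simp only [PySem.List.insertBy, hb, decide_true, if_true]
      refine List.pairwise_cons.mpr ⟨?_, h⟩
      intro c hc
      rcases List.mem_cons.mp hc with rfl | hc
      · exact le_of_lt hb
      · exact le_trans (le_of_lt hb) (hy c hc)
    · simp only [PySem.List.insertBy, hb, decide_false]
      refine List.pairwise_cons.mpr ⟨?_, ih hys⟩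
      intro c hc
      rcases (PySem.List.mem_insertBy _ x c ys).mp hc with rfl | hc
      · exact le_of_not_gt hb
      · exact hy c hc

-- filter commutes with insertBy into a key-sorted list (stability of the insertion)
theorem pv_filter_insertBy {α κ : Type} [LinearOrder κ] (key : α → κ) (p : α → Bool) (x : α)
    (ys : List α) (h : ys.Pairwise (fun a c => key a ≤ key c)) :
    (PySem.List.insertBy (fun a b => decide (key a < key b)) x ys).filter p =
      if p x then PySem.List.insertBy (fun a b => decide (key a < key b)) x (ys.filter p)
      else ys.filter p := by
  induction ys with
  | nil => cases hp : p x <;> simp [PySem.List.insertBy, hp]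
  | cons y ys ih =>
    rcases List.pairwise_cons.mp h with ⟨hy, hys⟩
    by_cases hb : key x < key y
    · simp only [PySem.List.insertBy, hb, decide_true, if_true]
      cases hp : p x with
      | false => simp [List.filter, hp]
      | true =>
        cases hpy : p y with
        | true => simp [List.filter, hp, hpy, PySem.List.insertBy, hb]
        | false =>
          simp only [List.filter, hp, hpy, if_true]
          cases hf : ys.filter p with
          | nil => simp [PySem.List.insertBy]
          | cons z zs =>
            have hz : z ∈ ys := List.mem_of_mem_filter (hf ▸ List.mem_cons_self)
            have : key x < key z := lt_of_lt_of_le hb (hy z hz)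
            simp [PySem.List.insertBy, this]
    · simp only [PySem.List.insertBy, hb, decide_false]
      cases hpy : p y with
      | false => simpa [List.filter, hpy] using ih hys
      | true =>
        cases hp : p x with
        | false => simpa [List.filter, hpy, hp] using ih hys
        | true =>
          simp only [Bool.false_eq_true, if_false, List.filter_cons_of_pos hpy]
          rw [ih hys]
          simp [PySem.List.insertBy, hb, hp]

-- the fold building sorted, with filter pushed through
theorem pv_filter_foldl_insertBy {α κ : Type} [LinearOrder κ] (key : α → κ) (p : α → Bool)
    (l : List α) :
    ∀ (acc : List α), acc.Pairwise (fun a c => key a ≤ key c) →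
    (l.foldl (fun acc x => PySem.List.insertBy (fun a b => decide (key a < key b)) x acc) acc).filter p =
      (l.filter p).foldl (fun acc x => PySem.List.insertBy (fun a b => decide (key a < key b)) x acc) (acc.filter p) := by
  induction l with
  | nil => intro acc _; rfl
  | cons x l ih =>
    intro acc hacc
    have hacc' := pv_pairwise_insertBy key x acc hacc
    simp only [List.foldl_cons]
    rw [ih _ hacc', pv_filter_insertBy key p x acc hacc]
    cases hp : p x with
    | true => simp [List.filter, hp]
    | false => simp [List.filter, hp]

-- stability: filtering a stably sorted list = sorting the filtered list
theorem pv_filter_sorted {α κ : Type} [LinearOrder κ] (key : α → κ) (p : α → Bool) (xs : List α) :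
    (PySem.List.sorted xs key false).filter p = PySem.List.sorted (xs.filter p) key false := by
  rw [PySem.List.sorted_eq_foldl_insertBy, PySem.List.sorted_eq_foldl_insertBy]
  simpa using pv_filter_foldl_insertBy key p xs [] List.Pairwise.nil

-- A's single partition loop = two filters
theorem pv_loop_eq_filters (mark_ok : Int) (l : List (String × Int)) :
    ∀ (a r : List (String × Int)),
    l.foldl (fun (ar : List (String × Int) × List (String × Int)) i =>
        if mark_ok ≤ i.2 then (ar.1 ++ [i], ar.2) else (ar.1, ar.2 ++ [i])) (a, r) =
      (a ++ l.filter (fun s => decide (mark_ok ≤ s.2)),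
       r ++ l.filter (fun s => decide (s.2 < mark_ok))) := by
  induction l with
  | nil => intro a r; simp
  | cons x l ih =>
    intro a r
    by_cases hx : mark_ok ≤ x.2
    · have hx' : ¬ x.2 < mark_ok := not_lt.mpr hx
      simp [List.filter, hx, hx', ih]
    · have hx' : x.2 < mark_ok := not_le.mp hx
      simp [List.filter, hx, hx', ih]

-- B's single loop over the unsorted list = two insertion folds over the two filters
theorem pv_B_split (mark_ok : Int) (l : List (String × Int)) :
    ∀ (a r : List (String × Int)),
    l.foldl (fun (ar : List (String × Int) × List (String × Int)) s =>
        if mark_ok ≤ s.2 then (pvInsDesc s ar.1, ar.2) else (ar.1, pvInsAsc s ar.2)) (a, r) =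
      ((l.filter (fun s => decide (mark_ok ≤ s.2))).foldl (fun acc s => pvInsDesc s acc) a,
       (l.filter (fun s => decide (s.2 < mark_ok))).foldl (fun acc s => pvInsAsc s acc) r) := by
  induction l with
  | nil => intro a r; simp
  | cons x l ih =>
    intro a r
    by_cases hx : mark_ok ≤ x.2
    · have hx' : ¬ x.2 < mark_ok := not_lt.mpr hx
      simp [List.filter, hx, hx', ih]
    · have hx' : x.2 < mark_ok := not_le.mp hx
      simp [List.filter, hx, hx', ih]

-- ascending insertion is exactly PySem's insertBy on the mark key
theorem pv_insAsc_eq_insertBy (x : String × Int) (l : List (String × Int)) :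
    pvInsAsc x l = PySem.List.insertBy (fun a b => decide (a.2 < b.2)) x l := by
  induction l with
  | nil => rfl
  | cons y ys ih =>
    by_cases h : y.2 ≤ x.2
    · have h' : ¬ x.2 < y.2 := not_lt.mpr h
      simp [pvInsAsc, PySem.List.insertBy, h, h', ih]
    · have h' : x.2 < y.2 := not_le.mp h
      simp [pvInsAsc, PySem.List.insertBy, h, h']

-- takeWhile/dropWhile characterisations of the two insertions (any list)
theorem pv_insAsc_tw (x : String × Int) (l : List (String × Int)) :
    pvInsAsc x l = l.takeWhile (fun y => decide (y.2 ≤ x.2)) ++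
      x :: l.dropWhile (fun y => decide (y.2 ≤ x.2)) := by
  induction l with
  | nil => rfl
  | cons y ys ih =>
    by_cases h : y.2 ≤ x.2
    · simp [pvInsAsc, List.takeWhile, List.dropWhile, h, ih]
    · simp [pvInsAsc, List.takeWhile, List.dropWhile, h]

theorem pv_insDesc_tw (x : String × Int) (l : List (String × Int)) :
    pvInsDesc x l = l.takeWhile (fun y => decide (x.2 < y.2)) ++
      x :: l.dropWhile (fun y => decide (x.2 < y.2)) := by
  induction l with
  | nil => rfl
  | cons y ys ih =>
    by_cases h : x.2 < y.2
    · simp [pvInsDesc, List.takeWhile, List.dropWhile, h, ih]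
    · simp [pvInsDesc, List.takeWhile, List.dropWhile, h]

-- on a Pairwise-sorted list a predicate closed under the order turns takeWhile/dropWhile into filters
theorem pv_tw_dw_eq_filter {α : Type} (R : α → α → Prop) (p : α → Bool) (l : List α)
    (h : l.Pairwise R) (hp : ∀ a b, R a b → p b = true → p a = true) :
    l.takeWhile p = l.filter p ∧ l.dropWhile p = l.filter (fun x => !p x) := by
  induction l with
  | nil => exact ⟨rfl, rfl⟩
  | cons y ys ih =>
    rcases List.pairwise_cons.mp h with ⟨hy, hys⟩
    rcases ih hys with ⟨ht, hd⟩
    cases hpy : p y with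
    | true => simp [List.takeWhile, List.dropWhile, List.filter, hpy, ht, hd]
    | false =>
      have hz : ∀ z ∈ ys, p z = false := by
        intro z hz
        cases hpz : p z with
        | false => rfl
        | true => exact absurd (hp y z (hy z hz) hpz) (by simp [hpy])
      constructor
      · have : ys.filter p = [] := List.filter_eq_nil_iff.mpr (by intro z h'; simp [hz z h'])
        simp [List.takeWhile, List.filter, hpy, this]
      · have : ys.filter (fun x => !p x) = ys :=
          List.filter_eq_self.mpr (by intro z h'; simp [hz z h'])
        simp [List.dropWhile, List.filter, hpy, this]

-- descending insertion into the reverse of an ascending-sorted list = reverse of ascending insertion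
theorem pv_insDesc_reverse (x : String × Int) (acc : List (String × Int))
    (h : acc.Pairwise (fun a c => a.2 ≤ c.2)) :
    pvInsDesc x acc.reverse = (pvInsAsc x acc).reverse := by
  have hA := pv_tw_dw_eq_filter (fun a c : String × Int => a.2 ≤ c.2)
      (fun y => decide (y.2 ≤ x.2)) acc h
      (by intro a b hab hb; simp at hb ⊢; omega)
  have hrev : acc.reverse.Pairwise (fun a c : String × Int => c.2 ≤ a.2) := by
    rw [List.pairwise_reverse]; exact h
  have hD := pv_tw_dw_eq_filter (fun a c : String × Int => c.2 ≤ a.2)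
      (fun y => decide (x.2 < y.2)) acc.reverse hrev
      (by intro a b hab hb; simp at hb ⊢; omega)
  have hnot : (fun y : String × Int => !decide (y.2 ≤ x.2)) = (fun y => decide (x.2 < y.2)) := by
    funext y; by_cases hy : y.2 ≤ x.2 <;> simp [hy] <;> omega
  rw [pv_insDesc_tw, pv_insAsc_tw, hA.1, hA.2, hD.1, hD.2, hnot]
  have hnot2 : (fun y : String × Int => !decide (x.2 < y.2)) = (fun y => decide (y.2 ≤ x.2)) := by
    funext y; by_cases hy : x.2 < y.2 <;> simp [hy] <;> omega
  rw [hnot2, List.filter_reverse, List.filter_reverse]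
  simp

-- folding descending insertions over any list, starting from the reverse of a sorted accumulator,
-- is the reverse of folding ascending insertions
theorem pv_foldD_reverse (l : List (String × Int)) :
    ∀ (acc : List (String × Int)), acc.Pairwise (fun a c => a.2 ≤ c.2) →
    l.foldl (fun r s => pvInsDesc s r) acc.reverse =
      (l.foldl (fun r s => pvInsAsc s r) acc).reverse := by
  induction l with
  | nil => intro acc _; rfl
  | cons x l ih =>
    intro acc hacc
    have hstep := pv_insDesc_reverse x acc hacc
    have hsorted : (pvInsAsc x acc).Pairwise (fun a c : String × Int => a.2 ≤ c.2) := by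
      rw [pv_insAsc_eq_insertBy]
      exact pv_pairwise_insertBy (fun s : String × Int => s.2) x acc hacc
    simp only [List.foldl_cons, hstep]
    exact ih (pvInsAsc x acc) hsorted

-- the ascending insertion fold is PySem's sort
theorem pv_foldA_eq_sorted (l : List (String × Int)) :
    l.foldl (fun r s => pvInsAsc s r) [] = PySem.List.sorted l (fun s => s.2) false := by
  rw [PySem.List.sorted_eq_foldl_insertBy]
  induction l using List.reverseRecOn with
  | nil => rfl
  | append_singleton l x ih => simp [List.foldl_append, pv_insAsc_eq_insertBy]

-- ===== VERDICT (by name: the statement is the Claim_ definition above) =====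
theorem select_student_spec : Claim_equal_select_student := by
  intro my_class mark_ok _
  show _ = _
  unfold select_student select_student_alt
  simp only [pv_loop_eq_filters mark_ok, pv_B_split mark_ok, List.nil_append,
    PySem.List.slice?_none_none_neg_one, Option.getD_some]
  have hacc : (my_class.filter (fun s => decide (mark_ok ≤ s.2))).foldl
      (fun acc s => pvInsDesc s acc) [] =
      ((my_class.filter (fun s => decide (mark_ok ≤ s.2))).foldl
        (fun acc s => pvInsAsc s acc) []).reverse := by
    have := pv_foldD_reverse (my_class.filter (fun s => decide (mark_ok ≤ s.2))) [] List.Pairwise.nil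
    simpa using this
  rw [hacc, pv_foldA_eq_sorted, pv_foldA_eq_sorted, ← pv_filter_sorted, ← pv_filter_sorted]
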